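-- pv_equiv track=rewrite | github.com/DanishKhan-pixel/webscraping-python | scrapper_copy.py | merge_vehicle_data
-- ===== SOURCE A (Python) =====
-- def merge_vehicle_data(results):
--     """Merge partial vehicle data chunks safely."""
--     if not results:
--         return None
--
--     valid = [r for r in results if isinstance(r, dict)]
--     if not valid:
--         return None
--
--     merged = valid[0].copy()
--
--     for data in valid[1:]:
--         for key, val2 in data.items():
--             if key not in merged or not merged[key]:
--                 merged[key] = val2
--     return merged
-- ===== SOURCE B (Python) =====
-- def _collapse(vs):
--     acc = vs[0]
--     for v in vs[1:]:
--         if not acc: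
--             acc = v
--     return acc
--
--
-- def merge_vehicle_data(results):
--     """Merge partial vehicle data chunks: group values per key, then collapse."""
--     if not results:
--         return None
--     valid = [r for r in results if isinstance(r, dict)]
--     if not valid:
--         return None
--     groups = {}
--     for d in valid:
--         for k, v in d.items():
--             groups.setdefault(k, []).append(v)
--     return {k: _collapse(vs) for k, vs in groups.items()}
-- ===== Notes on version B (the rewrite author's own statement) =====
-- stated objective: alternative
-- what changed: A folds later dicts into a copy of the first with an in-place conditional update per key; B instead groups all values per key (first-appearance order) in one pass and then collapses each value list with 'keep acc unless falsy'.
import Mathlib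
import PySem

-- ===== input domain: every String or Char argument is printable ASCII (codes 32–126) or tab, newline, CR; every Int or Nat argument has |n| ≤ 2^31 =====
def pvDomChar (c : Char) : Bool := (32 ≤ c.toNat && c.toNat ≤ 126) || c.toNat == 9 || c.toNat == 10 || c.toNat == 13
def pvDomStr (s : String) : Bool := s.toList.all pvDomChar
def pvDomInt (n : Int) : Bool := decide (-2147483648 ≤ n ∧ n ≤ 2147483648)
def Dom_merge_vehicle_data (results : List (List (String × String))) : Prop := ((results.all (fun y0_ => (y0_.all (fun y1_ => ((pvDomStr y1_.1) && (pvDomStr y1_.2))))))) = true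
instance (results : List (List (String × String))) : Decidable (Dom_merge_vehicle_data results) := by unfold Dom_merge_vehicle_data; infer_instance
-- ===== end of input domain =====

-- B replaces A's sequential merge-update loop by a group-then-collapse pass (per key, fold
-- 'keep acc unless empty' over its values in encounter order): an alternative decomposition, same cost.

-- ===== PORT A =====
-- At this type every element of `results` is a Python dict, so `isinstance(r, dict)` is
-- always true and `valid` is `results` itself (each inner assoc list read with dict
-- semantics: PySem.Dict.ofList, last value wins for a duplicated key).
def merge_vehicle_data (results : List (List (String × String))) : Option (List (String × String)) :=
  if results = [] then none                                   -- if not results: return None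
  else
    match results.map (fun r => PySem.Dict.ofList r) with
    | [] => none                                              -- if not valid: return None
    | d0 :: rest =>                                           -- merged = valid[0].copy(); for data in valid[1:] …
      let merged := rest.foldl
        (fun m d => d.items.foldl
          (fun m kv =>
            if m.contains kv.1 = false ∨ m.getD kv.1 "" = "" then m.insert kv.1 kv.2 else m)
          m)
        d0
      some merged.items

-- ===== PORT B =====
-- _collapse(vs): vs[0] then 'if not acc: acc = v' over vs[1:] (groups are built nonempty,
-- so the [] branch is unreachable; "" is a harmless default).
def pvCollapse (vs : List String) : String :=
  match vs with
  | [] => ""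
  | a :: rest => rest.foldl (fun acc v => if acc = "" then v else acc) a

def merge_vehicle_data_alt (results : List (List (String × String))) : Option (List (String × String)) :=
  if results = [] then none                                   -- if not results: return None
  else
    match results.map (fun r => PySem.Dict.ofList r) with     -- valid (isinstance always true here)
    | [] => none                                              -- if not valid: return None
    | d0 :: rest =>
      let groups : PySem.Dict String (List String) :=         -- groups.setdefault(k, []).append(v)
        (d0 :: rest).foldl
          (fun g d => d.items.foldl
            (fun g kv => g.modify kv.1 [] (fun vs => vs ++ [kv.2])) g)
          PySem.Dict.empty
      some (groups.items.map (fun p => (p.1, pvCollapse p.2)))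

-- ===== PRECONDITION & SPEC =====
def Spec_merge_vehicle_data (results : List (List (String × String))) (out : Option (List (String × String))) : Prop := out = merge_vehicle_data_alt results
instance (results : List (List (String × String))) (out : Option (List (String × String))) : Decidable (Spec_merge_vehicle_data results out) := by unfold Spec_merge_vehicle_data; infer_instance

-- ===== CLAIM (what is proved, stated in full; the proofs are below) =====
def Claim_equal_merge_vehicle_data : Prop := ∀ (results : List (List (String × String))), Dom_merge_vehicle_data results → Spec_merge_vehicle_data results (merge_vehicle_data results)

-- ===== LEMMAS AND PROOFS =====

-- A's per-pair update step and B's per-pair grouping step.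
def pvAStep (m : PySem.Dict String String) (kv : String × String) : PySem.Dict String String :=
  if m.contains kv.1 = false ∨ m.getD kv.1 "" = "" then m.insert kv.1 kv.2 else m

def pvGStep (g : PySem.Dict String (List String)) (kv : String × String) : PySem.Dict String (List String) :=
  g.modify kv.1 [] (fun vs => vs ++ [kv.2])

def pvColP (p : String × List String) : String × String := (p.1, pvCollapse p.2)

def pvCollapseD (g : PySem.Dict String (List String)) : PySem.Dict String String :=
  PySem.Dict.mk (g.items.map pvColP)

theorem pvCollapse_append_singleton (vs : List String) (v : String) :
    pvCollapse (vs ++ [v]) = if pvCollapse vs = "" then v else pvCollapse vs := by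
  cases vs with
  | nil => simp [pvCollapse]
  | cons a rest => simp [pvCollapse, List.foldl_append]

theorem pvContains_collapseD (g : PySem.Dict String (List String)) (x : String) :
    (pvCollapseD g).contains x = g.contains x := by
  simp [pvCollapseD, PySem.Dict.contains, List.any_map, Function.comp_def, pvColP]

theorem pvGet?_collapseD (g : PySem.Dict String (List String)) (x : String) :
    (pvCollapseD g).get? x = (g.get? x).map pvCollapse := by
  simp [pvCollapseD, PySem.Dict.get?, List.find?_map, Function.comp_def, pvColP]

theorem pvStep (g : PySem.Dict String (List String)) (hn : g.keys.Nodup) (kv : String × String) :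
    pvCollapseD (pvGStep g kv) = pvAStep (pvCollapseD g) kv := by
  obtain ⟨k, v⟩ := kv
  by_cases hc : g.contains k = true
  · obtain ⟨vs, hgv⟩ : ∃ vs, g.get? k = some vs := by
      rw [PySem.Dict.contains_eq_isSome_get?] at hc
      exact Option.isSome_iff_exists.mp hc
    have hgd : g.getD k [] = vs := PySem.Dict.getD_of_get?_eq_some g [] hgv
    have hcc : (pvCollapseD g).contains k = true := by rw [pvContains_collapseD]; exact hc
    have hcd : (pvCollapseD g).getD k "" = pvCollapse vs := by
      rw [PySem.Dict.getD_eq_get?_getD, pvGet?_collapseD, hgv]; rfl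
    have hG : pvGStep g (k, v) = g.insert k (vs ++ [v]) := by
      unfold pvGStep; rw [PySem.Dict.modify]; rw [show ((k, v).1 : String) = k from rfl, hgd]
    by_cases he : pvCollapse vs = ""
    · -- merged value is falsy: A overwrites in place, B's collapse picks up the new value
      have hA : pvAStep (pvCollapseD g) (k, v) = (pvCollapseD g).insert k v := by
        unfold pvAStep; simp [hcd, he]
      rw [hG, hA]
      apply PySem.Dict.ext
      show ((g.insert k (vs ++ [v])).items).map pvColP = _
      rw [PySem.Dict.items_insert_of_contains _ _ hc,
        PySem.Dict.items_insert_of_contains _ _ hcc]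
      show _ = List.map _ (g.items.map pvColP)
      rw [List.map_map, List.map_map]
      apply List.map_congr_left
      intro p _
      by_cases hp : p.1 = k
      · simp [Function.comp, pvColP, hp, pvCollapse_append_singleton, he]
      · simp [Function.comp, pvColP, hp]
    · -- merged value is truthy: A keeps it, B's collapse ignores the appended value
      have hA : pvAStep (pvCollapseD g) (k, v) = pvCollapseD g := by
        unfold pvAStep; simp [hcc, hcd, he]
      rw [hG, hA]
      apply PySem.Dict.ext
      show ((g.insert k (vs ++ [v])).items).map pvColP = (g.items).map pvColP
      rw [PySem.Dict.items_insert_of_contains _ _ hc, List.map_map]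
      apply List.map_congr_left
      intro p hp
      by_cases hpk : p.1 = k
      · have hmem : (p.1, p.2) ∈ g.items := hp
        have hsome : g.get? k = some p.2 := by
          have := PySem.Dict.get?_of_mem_items g hmem hn
          rwa [hpk] at this
        have hpv : p.2 = vs := by rw [hgv] at hsome; exact (Option.some.inj hsome).symm
        simp [Function.comp, pvColP, hpk, hpv, pvCollapse_append_singleton, he]
      · simp [Function.comp, pvColP, hpk]
  · have hc' : g.contains k = false := by simpa using hc
    have hcc : (pvCollapseD g).contains k = false := by rw [pvContains_collapseD]; exact hc'
    have hG : pvGStep g (k, v) = g.insert k [v] := by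
      unfold pvGStep
      rw [PySem.Dict.modify, show ((k, v).1 : String) = k from rfl,
        PySem.Dict.getD_of_not_contains _ _ hc']
      rfl
    have hA : pvAStep (pvCollapseD g) (k, v) = (pvCollapseD g).insert k v := by
      unfold pvAStep; simp [hcc]
    rw [hG, hA]
    apply PySem.Dict.ext
    show ((g.insert k [v]).items).map pvColP = _
    rw [PySem.Dict.items_insert_of_not_contains _ _ hc',
      PySem.Dict.items_insert_of_not_contains _ _ hcc]
    show _ = (g.items).map pvColP ++ [(k, v)]
    simp [pvColP, pvCollapse]

theorem pvFoldPairs (L : List (String × String)) (g : PySem.Dict String (List String))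
    (hn : g.keys.Nodup) :
    L.foldl pvAStep (pvCollapseD g) = pvCollapseD (L.foldl pvGStep g) := by
  induction L generalizing g with
  | nil => rfl
  | cons kv L ih =>
    simp only [List.foldl_cons]
    rw [← pvStep g hn kv, ih _ (by
      simpa [pvGStep, PySem.Dict.modify] using PySem.Dict.nodup_keys_insert _ _ _ hn)]

theorem pvNodupFoldG (L : List (String × String)) (g : PySem.Dict String (List String))
    (hn : g.keys.Nodup) : (L.foldl pvGStep g).keys.Nodup := by
  induction L generalizing g with
  | nil => exact hn
  | cons kv L ih =>
    exact ih _ (by simpa [pvGStep, PySem.Dict.modify] using PySem.Dict.nodup_keys_insert _ _ _ hn)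

theorem pvFoldDicts (ds : List (PySem.Dict String String)) (g : PySem.Dict String (List String))
    (hn : g.keys.Nodup) :
    ds.foldl (fun m d => d.items.foldl pvAStep m) (pvCollapseD g)
      = pvCollapseD (ds.foldl (fun g d => d.items.foldl pvGStep g) g) := by
  induction ds generalizing g with
  | nil => rfl
  | cons d ds ih =>
    simp only [List.foldl_cons]
    rw [pvFoldPairs _ _ hn, ih _ (pvNodupFoldG _ _ hn)]

theorem pvFoldAFresh (l : List (String × String)) (m : PySem.Dict String String)
    (hfresh : ∀ p ∈ l, m.contains p.1 = false) (hnd : (l.map Prod.fst).Nodup) :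
    l.foldl pvAStep m = PySem.Dict.mk (m.items ++ l) := by
  induction l generalizing m with
  | nil => simp
  | cons kv l ih =>
    have hf : m.contains kv.1 = false := hfresh kv List.mem_cons_self
    have hstep : pvAStep m kv = PySem.Dict.mk (m.items ++ [kv]) := by
      unfold pvAStep
      rw [if_pos (Or.inl hf)]
      apply PySem.Dict.ext
      rw [PySem.Dict.items_insert_of_not_contains _ _ hf]
    rw [List.foldl_cons, hstep,
      ih _ (by
        intro p hp
        have hne : p.1 ≠ kv.1 := by
          intro hEq
          have : kv.1 ∈ l.map Prod.fst := by
            rw [← hEq]; exact List.mem_map.mpr ⟨p, hp, rfl⟩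
          exact (List.nodup_cons.mp (by simpa using hnd)).1 this
        simp [PySem.Dict.contains, List.any_append]
        constructor
        · have := hfresh p (List.mem_cons_of_mem _ hp)
          simpa [PySem.Dict.contains] using this
        · exact fun h => hne h.symm)
        (by simpa using (List.nodup_cons.mp (by simpa using hnd)).2)]
    simp

theorem pvBase (d : PySem.Dict String String) (hn : d.keys.Nodup) :
    pvCollapseD (d.items.foldl pvGStep PySem.Dict.empty) = d := by
  have h := pvFoldPairs d.items PySem.Dict.empty (by simp [PySem.Dict.keys, PySem.Dict.empty])
  have hc : pvCollapseD PySem.Dict.empty = PySem.Dict.empty := rfl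
  rw [hc] at h
  rw [← h, pvFoldAFresh d.items PySem.Dict.empty (by intro p _; rfl) (by simpa [PySem.Dict.keys] using hn)]
  rfl

-- ===== VERDICT (by name: the statement is the Claim_ definition above) =====
theorem merge_vehicle_data_spec : Claim_equal_merge_vehicle_data := by
  intro results _
  unfold Spec_merge_vehicle_data merge_vehicle_data merge_vehicle_data_alt
  by_cases h : results = []
  · simp [h]
  · simp only [if_neg h]
    cases hm : results.map (fun r => PySem.Dict.ofList r) with
    | nil => rfl
    | cons d0 rest =>
      simp only []
      have hstep : (fun (m : PySem.Dict String String) kv =>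
          if m.contains kv.1 = false ∨ m.getD kv.1 "" = "" then m.insert kv.1 kv.2 else m)
          = pvAStep := rfl
      have hg : (fun (g : PySem.Dict String (List String)) (kv : String × String) =>
          g.modify kv.1 [] (fun vs => vs ++ [kv.2])) = pvGStep := rfl
      rw [hstep, hg]
      have hd0 : d0.keys.Nodup := by
        have : d0 ∈ results.map (fun r => PySem.Dict.ofList r) := by rw [hm]; exact List.mem_cons_self
        obtain ⟨r, _, hr⟩ := List.mem_map.mp this
        rw [← hr]; exact PySem.Dict.nodup_keys_ofList r
      have hmain :
          rest.foldl (fun m d => d.items.foldl pvAStep m) d0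
            = pvCollapseD ((d0 :: rest).foldl (fun g d => d.items.foldl pvGStep g) PySem.Dict.empty) := by
        have hbase := pvBase d0 hd0
        have := pvFoldDicts rest (d0.items.foldl pvGStep PySem.Dict.empty)
          (pvNodupFoldG d0.items PySem.Dict.empty (by simp [PySem.Dict.keys, PySem.Dict.empty]))
        rw [hbase] at this
        simpa using this
      rw [hmain]
      rfl
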